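-- pv_equiv track=rewrite | github.com/sbw986/WB_Program_Generator | src/cnt_spincast_expander.py | expand_bond_list_cnf
-- ===== SOURCE A (Python) =====
-- def expand_bond_list_cnf(chip_pad_job,package_pad_job):
--     """
--     This program expands list of bond sites customized for spincast CNT bond jobs
--     :param chip_pad_job: List of chip pad IDs to bond
--     :param package_pad_job: List of package finger IDs to bond
--     :return: expanded lists
--     """
--
--     chip_pad_job_left_D = []
--     chip_pad_job_left_C = []
--     chip_pad_job_left_B = []
--     chip_pad_job_left_A = []
--     chip_pad_job_right_D = []
--     chip_pad_job_right_C = []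
--     chip_pad_job_right_B = []
--     chip_pad_job_right_A = []
--
--     package_pad_job_left_D = []
--     package_pad_job_left_C = []
--     package_pad_job_left_B = []
--     package_pad_job_left_A = []
--     package_pad_job_right_D = []
--     package_pad_job_right_C = []
--     package_pad_job_right_B = []
--     package_pad_job_right_A = []
--
--     grp_L_D = []
--     grp_L_C = []
--     grp_L_B = []
--     grp_L_A = []
--     grp_R_D = []
--     grp_R_C = []
--     grp_R_B = []
--     grp_R_A = []
--
--     chip_pt = ['PT01', 'CC01', 'PT02', 'PT03', 'CC03', 'PT04']
--     package_pt = [59, 62, 116, 175, 178, 232]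
--     grp_PT = [1 for i,_ in enumerate(package_pt)]
--
--     for chip,package in zip(chip_pad_job,package_pad_job):
--         if package >=1 and package <= 58:
--             if 'D' in chip:
--                 grp_L_D.append(1)
--                 grp_R_D.append(4)
--                 chip_pad_job_left_D.append(chip + 'L')
--                 chip_pad_job_right_D.append(chip + 'R')
--                 package_pad_job_left_D.append(package)
--                 package_pad_job_right_D.append(58 * 3 + 1 - package)
--             elif 'C' in chip:
--                 grp_L_C.append(2)
--                 grp_R_C.append(3)
--                 chip_pad_job_left_C.append(chip + 'L')
--                 chip_pad_job_right_C.append(chip + 'R')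
--                 package_pad_job_left_C.append(package)
--                 package_pad_job_right_C.append(58 * 3 + 1 - package)
--             elif 'B' in chip:
--                 grp_L_B.append(3)
--                 grp_R_B.append(2)
--                 chip_pad_job_left_B.append(chip + 'L')
--                 chip_pad_job_right_B.append(chip + 'R')
--                 package_pad_job_left_B.append(package)
--                 package_pad_job_right_B.append(58 * 3 + 1 - package)
--             elif 'A' in chip:
--                 grp_L_A.append(4)
--                 grp_R_A.append(1)
--                 chip_pad_job_left_A.append(chip + 'L')
--                 chip_pad_job_right_A.append(chip + 'R')
--                 package_pad_job_left_A.append(package)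
--                 package_pad_job_right_A.append(58 * 3 + 1 - package)
--             elif 'PT' in chip:
--                 grp_PT.append(1)
--
--     chip_pad_job_expanded = chip_pad_job_left_D + chip_pad_job_left_C + chip_pad_job_left_B + chip_pad_job_left_A +\
--                             chip_pad_job_right_A + chip_pad_job_right_B + chip_pad_job_right_C + chip_pad_job_right_D +\
--                             chip_pt
--     package_pad_job_expanded = package_pad_job_left_D + package_pad_job_left_C + package_pad_job_left_B + package_pad_job_left_A +\
--                                package_pad_job_right_A + package_pad_job_right_B + package_pad_job_right_C + package_pad_job_right_D +\
--                                package_pt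
--     groups_job_expanded = grp_L_D + grp_L_C + grp_L_B + grp_L_A + grp_R_A + grp_R_B + grp_R_C + grp_R_D + grp_PT
--
--     return chip_pad_job_expanded, package_pad_job_expanded, groups_job_expanded
-- ===== SOURCE B (Python) =====
-- def expand_bond_list_cnf(chip_pad_job, package_pad_job):
--     """
--     Two-phase rewrite: one classification pass collecting (chip, package, letter)
--     records plus a PT-only count, then category-ordered assembly by filtering.
--     """
--     chip_pt = ['PT01', 'CC01', 'PT02', 'PT03', 'CC03', 'PT04']
--     package_pt = [59, 62, 116, 175, 178, 232]
--
--     recs = []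
--     pt_extra = 0
--     for chip, package in zip(chip_pad_job, package_pad_job):
--         if 1 <= package <= 58:
--             letter = next((l for l in 'DCBA' if l in chip), None)
--             if letter is not None:
--                 recs.append((chip, package, letter))
--             elif 'PT' in chip:
--                 pt_extra += 1
--
--     chips, packs, grps = [], [], []
--     for g, l in zip((1, 2, 3, 4), 'DCBA'):
--         sel = [r for r in recs if r[2] == l]
--         chips += [c + 'L' for c, _, _ in sel]
--         packs += [p for _, p, _ in sel]
--         grps += [g] * len(sel)
--     for g, l in zip((1, 2, 3, 4), 'ABCD'):
--         sel = [r for r in recs if r[2] == l]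
--         chips += [c + 'R' for c, _, _ in sel]
--         packs += [175 - p for _, p, _ in sel]
--         grps += [g] * len(sel)
--
--     return chips + chip_pt, packs + package_pt, grps + [1] * (6 + pt_extra)
-- ===== Notes on version B (the rewrite author's own statement) =====
-- stated objective: simpler
-- what changed: Replaces A's 25 parallel accumulator lists filled in one loop by a two-phase design: one classification pass producing (chip, package, letter) records plus a PT-only counter, then assembly by iterating the category orders D,C,B,A (left) and A,B,C,D (right) and filtering the records.
import Mathlib
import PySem

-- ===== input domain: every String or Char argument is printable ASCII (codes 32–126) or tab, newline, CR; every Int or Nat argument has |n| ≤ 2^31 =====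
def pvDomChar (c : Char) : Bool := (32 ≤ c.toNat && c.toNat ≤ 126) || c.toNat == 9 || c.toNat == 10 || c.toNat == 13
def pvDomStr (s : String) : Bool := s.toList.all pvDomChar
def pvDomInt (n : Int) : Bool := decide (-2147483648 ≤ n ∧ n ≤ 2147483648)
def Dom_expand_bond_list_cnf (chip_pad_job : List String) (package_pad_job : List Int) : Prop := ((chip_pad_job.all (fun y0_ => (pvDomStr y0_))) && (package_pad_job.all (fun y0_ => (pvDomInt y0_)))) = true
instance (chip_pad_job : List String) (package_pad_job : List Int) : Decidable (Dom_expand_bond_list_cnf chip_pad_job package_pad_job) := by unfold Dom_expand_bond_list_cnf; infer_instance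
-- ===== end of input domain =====

-- B replaces A's 25 parallel accumulator lists by one classification pass into records
-- plus a category-ordered assembly by filtering (objective: simpler).

-- ===== PORT A =====
-- The loop's state: the 8+8+8 per-category accumulator lists plus the extra-PT group list.
structure PvAState where
  cLD : List String
  cLC : List String
  cLB : List String
  cLA : List String
  cRD : List String
  cRC : List String
  cRB : List String
  cRA : List String
  pLD : List Int
  pLC : List Int
  pLB : List Int
  pLA : List Int
  pRD : List Int
  pRC : List Int
  pRB : List Int
  pRA : List Int
  gLD : List Int
  gLC : List Int
  gLB : List Int
  gLA : List Int
  gRD : List Int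
  gRC : List Int
  gRB : List Int
  gRA : List Int
  gPTextra : List Int
  deriving Repr, DecidableEq

-- The for-loop over zip(chip_pad_job, package_pad_job) as structural recursion:
-- each step contributes its appends in front of the rest of the iteration's lists.
def pvLoopA : List (String × Int) → PvAState
  | [] => ⟨[], [], [], [], [], [], [], [], [], [], [], [], [], [], [], [], [], [], [], [], [], [], [], [], []⟩
  | (chip, package) :: rest =>
    let s := pvLoopA rest
    if 1 ≤ package ∧ package ≤ 58 then
      if PySem.Str.isIn "D" chip then
        { s with gLD := 1 :: s.gLD, gRD := 4 :: s.gRD,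
                 cLD := (chip ++ "L") :: s.cLD, cRD := (chip ++ "R") :: s.cRD,
                 pLD := package :: s.pLD, pRD := (58 * 3 + 1 - package) :: s.pRD }
      else if PySem.Str.isIn "C" chip then
        { s with gLC := 2 :: s.gLC, gRC := 3 :: s.gRC,
                 cLC := (chip ++ "L") :: s.cLC, cRC := (chip ++ "R") :: s.cRC,
                 pLC := package :: s.pLC, pRC := (58 * 3 + 1 - package) :: s.pRC }
      else if PySem.Str.isIn "B" chip then
        { s with gLB := 3 :: s.gLB, gRB := 2 :: s.gRB,
                 cLB := (chip ++ "L") :: s.cLB, cRB := (chip ++ "R") :: s.cRB,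
                 pLB := package :: s.pLB, pRB := (58 * 3 + 1 - package) :: s.pRB }
      else if PySem.Str.isIn "A" chip then
        { s with gLA := 4 :: s.gLA, gRA := 1 :: s.gRA,
                 cLA := (chip ++ "L") :: s.cLA, cRA := (chip ++ "R") :: s.cRA,
                 pLA := package :: s.pLA, pRA := (58 * 3 + 1 - package) :: s.pRA }
      else if PySem.Str.isIn "PT" chip then
        { s with gPTextra := 1 :: s.gPTextra }
      else s
    else s

def expand_bond_list_cnf (chip_pad_job : List String) (package_pad_job : List Int) : List String × List Int × List Int :=
  let chip_pt : List String := ["PT01", "CC01", "PT02", "PT03", "CC03", "PT04"]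
  let package_pt : List Int := [59, 62, 116, 175, 178, 232]
  let grp_PT : List Int := [1, 1, 1, 1, 1, 1]
  let s := pvLoopA (chip_pad_job.zip package_pad_job)
  ( s.cLD ++ s.cLC ++ s.cLB ++ s.cLA ++ s.cRA ++ s.cRB ++ s.cRC ++ s.cRD ++ chip_pt,
    s.pLD ++ s.pLC ++ s.pLB ++ s.pLA ++ s.pRA ++ s.pRB ++ s.pRC ++ s.pRD ++ package_pt,
    s.gLD ++ s.gLC ++ s.gLB ++ s.gLA ++ s.gRA ++ s.gRB ++ s.gRC ++ s.gRD ++ (grp_PT ++ s.gPTextra) )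

-- ===== PORT B =====
-- next((l for l in 'DCBA' if l in chip), None)
def pvClassifyB (chip : String) : Option Char :=
  ['D', 'C', 'B', 'A'].find? (fun l => PySem.Str.isIn (String.ofList [l]) chip)

-- classification pass: the records list and the PT-only count
def pvCollectB : List (String × Int) → List (String × Int × Char) × Nat
  | [] => ([], 0)
  | (chip, package) :: rest =>
    let (rs, n) := pvCollectB rest
    if 1 ≤ package ∧ package ≤ 58 then
      match pvClassifyB chip with
      | some l => ((chip, package, l) :: rs, n)
      | none => if PySem.Str.isIn "PT" chip then (rs, n + 1) else (rs, n)
    else (rs, n)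

def expand_bond_list_cnf_alt (chip_pad_job : List String) (package_pad_job : List Int) : List String × List Int × List Int :=
  let chip_pt : List String := ["PT01", "CC01", "PT02", "PT03", "CC03", "PT04"]
  let package_pt : List Int := [59, 62, 116, 175, 178, 232]
  let (recs, pt_extra) := pvCollectB (chip_pad_job.zip package_pad_job)
  let left := [((1 : Int), 'D'), (2, 'C'), (3, 'B'), (4, 'A')].foldl
    (fun st gl =>
      let sel := recs.filter (fun r => r.2.2 == gl.2)
      (st.1 ++ sel.map (fun r => r.1 ++ "L"),
       st.2.1 ++ sel.map (fun r => r.2.1),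
       st.2.2 ++ List.replicate sel.length gl.1))
    (([] : List String), ([] : List Int), ([] : List Int))
  let both := [((1 : Int), 'A'), (2, 'B'), (3, 'C'), (4, 'D')].foldl
    (fun st gl =>
      let sel := recs.filter (fun r => r.2.2 == gl.2)
      (st.1 ++ sel.map (fun r => r.1 ++ "R"),
       st.2.1 ++ sel.map (fun r => 175 - r.2.1),
       st.2.2 ++ List.replicate sel.length gl.1))
    left
  (both.1 ++ chip_pt, both.2.1 ++ package_pt, both.2.2 ++ List.replicate (6 + pt_extra) (1 : Int))

-- ===== PRECONDITION & SPEC =====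
def Spec_expand_bond_list_cnf (chip_pad_job : List String) (package_pad_job : List Int) (out : List String × List Int × List Int) : Prop := out = expand_bond_list_cnf_alt chip_pad_job package_pad_job
instance (chip_pad_job : List String) (package_pad_job : List Int) (out : List String × List Int × List Int) : Decidable (Spec_expand_bond_list_cnf chip_pad_job package_pad_job out) := by unfold Spec_expand_bond_list_cnf; infer_instance

-- ===== CLAIM (what is proved, stated in full; the proofs are below) =====
def Claim_equal_expand_bond_list_cnf : Prop := ∀ (chip_pad_job : List String) (package_pad_job : List Int), Dom_expand_bond_list_cnf chip_pad_job package_pad_job → Spec_expand_bond_list_cnf chip_pad_job package_pad_job (expand_bond_list_cnf chip_pad_job package_pad_job)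

-- ===== LEMMAS AND PROOFS =====

-- A's loop state, reconstructed from B's records and PT count.
def pvStateOf (rn : List (String × Int × Char) × Nat) : PvAState :=
  let rs := rn.1
  let selD := rs.filter (fun r => r.2.2 == 'D')
  let selC := rs.filter (fun r => r.2.2 == 'C')
  let selB := rs.filter (fun r => r.2.2 == 'B')
  let selA := rs.filter (fun r => r.2.2 == 'A')
  ⟨ selD.map (fun r => r.1 ++ "L"), selC.map (fun r => r.1 ++ "L"),
    selB.map (fun r => r.1 ++ "L"), selA.map (fun r => r.1 ++ "L"),
    selD.map (fun r => r.1 ++ "R"), selC.map (fun r => r.1 ++ "R"),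
    selB.map (fun r => r.1 ++ "R"), selA.map (fun r => r.1 ++ "R"),
    selD.map (fun r => r.2.1), selC.map (fun r => r.2.1),
    selB.map (fun r => r.2.1), selA.map (fun r => r.2.1),
    selD.map (fun r => 175 - r.2.1), selC.map (fun r => 175 - r.2.1),
    selB.map (fun r => 175 - r.2.1), selA.map (fun r => 175 - r.2.1),
    List.replicate selD.length 1, List.replicate selC.length 2,
    List.replicate selB.length 3, List.replicate selA.length 4,
    List.replicate selD.length 4, List.replicate selC.length 3,
    List.replicate selB.length 2, List.replicate selA.length 1,
    List.replicate rn.2 1 ⟩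

theorem pvLoopA_eq (zs : List (String × Int)) : pvLoopA zs = pvStateOf (pvCollectB zs) := by
  induction zs with
  | nil => rfl
  | cons z rest ih =>
    obtain ⟨chip, package⟩ := z
    by_cases hr : 1 ≤ package ∧ package ≤ 58
    · cases hD : PySem.Str.isIn "D" chip <;>
      cases hC : PySem.Str.isIn "C" chip <;>
      cases hB : PySem.Str.isIn "B" chip <;>
      cases hA : PySem.Str.isIn "A" chip <;>
      cases hPT : PySem.Str.isIn "PT" chip <;>
      simp_all [pvLoopA, pvCollectB, pvClassifyB, pvStateOf, List.find?,
                List.replicate_succ]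
    · simp only [pvLoopA, pvCollectB, if_neg hr]
      exact ih

theorem expand_bond_list_cnf_spec' (chip_pad_job : List String) (package_pad_job : List Int) :
    expand_bond_list_cnf chip_pad_job package_pad_job = expand_bond_list_cnf_alt chip_pad_job package_pad_job := by
  unfold expand_bond_list_cnf expand_bond_list_cnf_alt
  rw [pvLoopA_eq]
  obtain ⟨rs, n⟩ := pvCollectB (chip_pad_job.zip package_pad_job)
  simp [pvStateOf, List.foldl, List.append_assoc, List.replicate_succ, List.replicate_add]

-- ===== VERDICT (by name: the statement is the Claim_ definition above) =====
theorem expand_bond_list_cnf_spec : Claim_equal_expand_bond_list_cnf := by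
  intro chips pkgs _
  exact expand_bond_list_cnf_spec' chips pkgs
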